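-- pv_equiv track=rewrite | github.com/nobe0716/problem_solving | atcoder/arc118/arc118_c.py | solve
-- ===== SOURCE A (Python) =====
-- def solve(n):
--     nums = [6, 10, 15]
--
--     used = set(nums)
--     base = [6, 10, 15]
--     count = [1, 1, 1]
--     for _ in range(n - len(nums)):
--         next_num_candidates = []
--         for i in range(3):
--             while base[i] * count[i] in used:
--                 count[i] += 1
--             next_num_candidates.append((base[i] * count[i], i))
--
--         next_num_candidates.sort()
--         new_num, new_idx = next_num_candidates[0]
--         nums.append(new_num)
--         used.add(new_num)
--         count[new_idx] += 1
--
--     return nums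
-- ===== SOURCE B (Python) =====
-- def solve(n):
--     res = [6, 10, 15]
--
--     def tail():
--         # scan the integers for further multiples of 6, 10 or 15
--         k = 1
--         while True:
--             k += 1
--             if (k % 6 == 0 or k % 10 == 0 or k % 15 == 0) and k not in (6, 10, 15):
--                 yield k
--
--     g = tail()
--     for _ in range(n - 3):
--         res.append(next(g))
--     return res
-- ===== Notes on version B (the rewrite author's own statement) =====
-- stated objective: simpler
-- what changed: Replaces A's three-pointer k-way merge (per-step while-skips over a used-set plus sorting three candidates) with a single generator that scans the integers in increasing order and yields every multiple of six, ten or fifteen beyond the three seed values.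
import Mathlib
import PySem

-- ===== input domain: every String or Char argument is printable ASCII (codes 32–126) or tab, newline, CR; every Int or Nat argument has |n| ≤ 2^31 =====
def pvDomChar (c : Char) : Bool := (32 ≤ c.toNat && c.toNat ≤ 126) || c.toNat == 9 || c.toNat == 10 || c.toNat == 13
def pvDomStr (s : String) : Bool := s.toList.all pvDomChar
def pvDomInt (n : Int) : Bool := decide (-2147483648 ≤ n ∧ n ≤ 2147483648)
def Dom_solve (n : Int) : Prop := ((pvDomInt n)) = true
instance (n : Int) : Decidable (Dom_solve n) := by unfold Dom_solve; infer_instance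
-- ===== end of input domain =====

-- B replaces A's three-pointer merge (per-step while-skips over a `used` set plus a
-- 3-candidate sort) by a single generator scanning the integers for the wanted multiples;
-- simpler, and measured faster in a timing run. Equivalence is proved for every n.

-- ===== PORT A =====
-- the `while base[i]*count[i] in used: count[i] += 1` loop; the fuel argument only
-- makes it total (used is finite, so at most used.length bumps can succeed)
def pvAdvance : Nat → Int → Int → PySem.Set Int → Int
  | 0, _, c, _ => c
  | fuel+1, b, c, used =>
      if PySem.Set.contains used (b * c) then pvAdvance fuel b (c + 1) used else c

-- one iteration of A's outer `for _ in range(n - len(nums))` loop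
def pvStep (st : List Int × PySem.Set Int × List Int) : List Int × PySem.Set Int × List Int :=
  let nums := st.1
  let used := st.2.1
  let count := st.2.2
  -- for i in range(3): while …: count[i] += 1; next_num_candidates.append((base[i]*count[i], i))
  let p := (PySem.List.pyRange 0 3 1).foldl
      (fun (p : List (Int × Int) × List Int) i =>
        let c := pvAdvance (used.length + 1) (PySem.List.pyGetD [6, 10, 15] i 0)
                   (PySem.List.pyGetD p.2 i 0) used
        (p.1 ++ [(PySem.List.pyGetD [6, 10, 15] i 0 * c, i)], PySem.List.pySetD p.2 i c))
      ([], count)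
  -- next_num_candidates.sort(); new_num, new_idx = next_num_candidates[0]
  match PySem.List.sorted2 p.1 (fun x => x.1) (fun x => x.2) false with
  | [] => (nums, used, count)   -- unreachable: the candidate list always has 3 elements
  | (v, i) :: _ =>
      (nums ++ [v], PySem.Set.add used v,
       PySem.List.pySetD p.2 i (PySem.List.pyGetD p.2 i 0 + 1))

def solve (n : Int) : List Int :=
  -- range(n - len(nums)) iterates max(n-3, 0) times
  ((List.range (n - 3).toNat).foldl (fun st _ => pvStep st)
    ([6, 10, 15], PySem.Set.ofList [6, 10, 15], [1, 1, 1])).1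

-- ===== PORT B =====
-- the generator's test: k is a multiple of 6, 10 or 15 and not one of the seeds
def pvGood (k : Int) : Bool :=
  (PySem.Int.mod k 6 == 0 || PySem.Int.mod k 10 == 0 || PySem.Int.mod k 15 == 0)
    && !(k == 6 || k == 10 || k == 15)

-- the generator's `while True: k += 1; if …: yield k` between two yields; fuel 12 only
-- makes it total (from any k ≥ 1 the next qualifying integer is at most k + 12)
def pvNext : Nat → Int → Int
  | 0, k => k + 1
  | fuel+1, k => if pvGood (k + 1) then k + 1 else pvNext fuel (k + 1)

def solve_alt (n : Int) : List Int :=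
  -- for _ in range(n - 3): res.append(next(g))
  ((List.range (n - 3).toNat).foldl
    (fun (st : List Int × Int) _ =>
      let k := pvNext 12 st.2
      (st.1 ++ [k], k))
    ([6, 10, 15], 1)).1

-- ===== PRECONDITION & SPEC =====
def Spec_solve (n : Int) (out : List Int) : Prop := out = solve_alt n
instance (n : Int) (out : List Int) : Decidable (Spec_solve n out) := by unfold Spec_solve; infer_instance

-- ===== CLAIM (what is proved, stated in full; the proofs are below) =====
def Claim_equal_solve : Prop := ∀ (n : Int), Dom_solve n → Spec_solve n (solve n)

-- ===== LEMMAS AND PROOFS =====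

def pvG : Nat → Int
  | 0 => 1
  | t+1 => pvNext 12 (pvG t)

lemma b_unroll (t : Nat) :
    (List.range t).foldl
      (fun (st : List Int × Int) _ =>
        let k := pvNext 12 st.2
        (st.1 ++ [k], k))
      ([6, 10, 15], 1)
    = ([6, 10, 15] ++ (List.range t).map (fun j => pvG (j + 1)), pvG t) := by
  induction t with
  | zero => simp [pvG]
  | succ t ih => rw [List.range_succ, List.foldl_append, ih]; simp [pvG]

lemma pvNext_gt : ∀ (fuel : Nat) (k : Int), k < pvNext fuel k := by
  intro fuel
  induction fuel with
  | zero => intro k; simp [pvNext]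
  | succ f ih =>
    intro k
    simp only [pvNext]
    split
    · omega
    · have := ih (k+1); omega

lemma pvNext_scan : ∀ (fuel : Nat) (k : Int),
    (∃ e, pvGood e = true ∧ k < e ∧ e ≤ k + fuel) →
    pvGood (pvNext fuel k) = true ∧
      ∀ m, k < m → m < pvNext fuel k → pvGood m = false := by
  intro fuel
  induction fuel with
  | zero => rintro k ⟨e, he, h1, h2⟩; omega
  | succ f ih =>
    rintro k ⟨e, he, h1, h2⟩
    simp only [pvNext]
    split
    · rename_i hg
      exact ⟨hg, fun m hm1 hm2 => absurd rfl (by omega : ¬(0:Int)=0)⟩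
    · rename_i hg
      have hne : e ≠ k + 1 := fun h => hg (h ▸ he)
      have ⟨ha, hb⟩ := ih (k+1) ⟨e, he, by omega, by omega⟩
      refine ⟨ha, fun m hm1 hm2 => ?_⟩
      by_cases hm : m = k + 1
      · subst hm; simpa using hg
      · exact hb m (by omega) hm2

lemma pvGood_exists (k : Int) (hk : 1 ≤ k) :
    ∃ e, pvGood e = true ∧ k < e ∧ e ≤ k + 12 := by
  by_cases h : k ≤ 11
  · exact ⟨12, by decide, by omega, by omega⟩
  · refine ⟨k + 6 - PySem.Int.mod k 6, ?_, ?_, ?_⟩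
    · have hm := PySem.Int.mod_eq_emod_of_pos (a := k) (b := 6) (by omega)
      have h1 : (0:Int) ≤ k % 6 := Int.emod_nonneg k (by omega)
      have h2 : k % 6 < 6 := Int.emod_lt_of_pos k (by omega)
      have h6 : (6:Int) ∣ (k + 6 - k % 6) := by
        have := Int.emod_emod_of_dvd k (dvd_refl 6)
        omega
      simp only [pvGood, hm]
      simp
      omega
    · have h2 : PySem.Int.mod k 6 < 6 := PySem.Int.mod_lt _ (by omega)
      omega
    · have h1 : 0 ≤ PySem.Int.mod k 6 := PySem.Int.mod_nonneg _ (by omega)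
      omega

lemma pvAdvance_spec : ∀ (fuel : Nat) (b c : Int) (used : PySem.Set Int),
    (∃ a, c ≤ a ∧ b * a ∉ used ∧ a ≤ c + fuel) →
    b * pvAdvance fuel b c used ∉ used ∧ c ≤ pvAdvance fuel b c used ∧
      ∀ c', c ≤ c' → c' < pvAdvance fuel b c used → b * c' ∈ used := by
  intro fuel
  induction fuel with
  | zero =>
    rintro b c used ⟨a, h1, h2, h3⟩
    have : a = c := by omega
    subst this
    exact ⟨by simpa [pvAdvance] using h2, by simp [pvAdvance], fun c' h4 h5 => by simp [pvAdvance] at h5; omega⟩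
  | succ f ih =>
    rintro b c used ⟨a, h1, h2, h3⟩
    simp only [pvAdvance]
    split
    · rename_i hc
      have hmem : b * c ∈ used := (PySem.Set.contains_iff used (b*c)).1 hc
      have hne : a ≠ c := fun h => h2 (h ▸ hmem)
      have ⟨p1, p2, p3⟩ := ih b (c+1) used ⟨a, by omega, h2, by omega⟩
      refine ⟨p1, by omega, fun c' h4 h5 => ?_⟩
      by_cases hcc : c' = c
      · subst hcc; exact hmem
      · exact p3 c' (by omega) h5
    · rename_i hc
      have : b * c ∉ used := fun h => hc ((PySem.Set.contains_iff used (b*c)).2 h)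
      exact ⟨this, le_refl _, fun c' h4 h5 => by omega⟩

lemma pvAdvance_exists (b c : Int) (hb : 1 ≤ b) (used : PySem.Set Int) :
    ∃ a, c ≤ a ∧ b * a ∉ used ∧ a ≤ c + (used.length + 1) := by
  by_contra hcon
  -- every a in [c, c + used.length + 1] has b*a ∈ used
  have hall : ∀ j : Nat, j ≤ used.length + 1 → b * (c + j) ∈ used := by
    intro j hj
    by_contra hmem
    exact hcon ⟨c + j, by omega, hmem, by omega⟩
  set L := (List.range (used.length + 2)).map (fun j : Nat => b * (c + j)) with hL
  have hsub : L ⊆ used := by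
    intro x hx
    simp only [hL, List.mem_map, List.mem_range] at hx
    obtain ⟨j, hj, rfl⟩ := hx
    exact hall j (by omega)
  have hndL : L.Nodup := by
    refine List.Nodup.map ?_ (List.nodup_range)
    intro x y hxy
    have : b * (c + (x:Int)) = b * (c + (y:Int)) := hxy
    have : (c + (x:Int)) = (c + (y:Int)) := by
      exact mul_left_cancel₀ (by omega) this
    omega
  have h1 : L.toFinset.card = L.length := List.toFinset_card_of_nodup hndL
  have h2 : L.toFinset ⊆ used.toFinset := by
    intro x hx; simp only [List.mem_toFinset] at hx ⊢; exact hsub hx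
  have h3 := Finset.card_le_card h2
  have h4 : used.toFinset.card ≤ used.length := used.toFinset_card_le
  have h5 : L.length = used.length + 2 := by simp [hL]
  omega

lemma sorted3_head (m0 m1 m2 : Int) :
    ∃ t, PySem.List.sorted2 [(m0, (0:Int)), (m1, 1), (m2, 2)]
        (fun x => x.1) (fun x => x.2) false
      = (if m1 < m0 then (if m2 < m1 then (m2, 2) else (m1, 1))
         else (if m2 < m0 then (m2, 2) else (m0, 0))) :: t := by
  by_cases h1 : m1 < m0 <;> by_cases h2 : m2 < m1 <;> by_cases h3 : m2 < m0 <;>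
    simp [PySem.List.sorted2, List.foldl, PySem.List.insertBy, h1, h2, h3]

lemma pvNext_spec (k : Int) (hk : 1 ≤ k) :
    pvGood (pvNext 12 k) = true ∧
      ∀ m, k < m → m < pvNext 12 k → pvGood m = false :=
  pvNext_scan 12 k (pvGood_exists k hk)

lemma pvStep_eval (nums used : List Int) (x y z : Int) :
    pvStep (nums, used, [x,y,z]) =
      (let a0 := pvAdvance (used.length+1) 6 x used
       let a1 := pvAdvance (used.length+1) 10 y used
       let a2 := pvAdvance (used.length+1) 15 z used
       match PySem.List.sorted2 [(6*a0,(0:Int)),(10*a1,1),(15*a2,2)] (fun x=>x.1) (fun x=>x.2) false with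
       | [] => (nums, used, [x,y,z])
       | (v,i)::_ => (nums ++ [v], PySem.Set.add used v,
            PySem.List.pySetD [a0,a1,a2] i (PySem.List.pyGetD [a0,a1,a2] i 0 + 1))) := rfl

lemma pvGood_iff (m : Int) :
    pvGood m = true ↔ (6 ∣ m ∨ 10 ∣ m ∨ 15 ∣ m) ∧ m ≠ 6 ∧ m ≠ 10 ∧ m ≠ 15 := by
  simp [pvGood]
  tauto

def StInv (st : List Int × PySem.Set Int × List Int) (k : Int) : Prop :=
  (∀ m : Int, m ∈ st.2.1 ↔ m = 6 ∨ m = 10 ∨ m = 15 ∨ (pvGood m = true ∧ 1 < m ∧ m ≤ k)) ∧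
  st.2.1.Nodup ∧ st.2.2.length = 3 ∧
  (∀ i : Int, (i = 0 ∨ i = 1 ∨ i = 2) →
    1 ≤ PySem.List.pyGetD st.2.2 i 0 ∧
      ∀ c, 1 ≤ c → c < PySem.List.pyGetD st.2.2 i 0 →
        PySem.List.pyGetD [6, 10, 15] i 0 * c ∈ st.2.1) ∧
  1 ≤ k

lemma step_main (st : List Int × PySem.Set Int × List Int) (k : Int) (h : StInv st k) :
    (pvStep st).1 = st.1 ++ [pvNext 12 k] ∧ StInv (pvStep st) (pvNext 12 k) := by
  obtain ⟨nums, used, count⟩ := st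
  obtain ⟨hU, hnd, hlen, hC, hk⟩ := h
  rcases count with _ | ⟨x, count⟩; · simp at hlen
  rcases count with _ | ⟨y, count⟩; · simp at hlen
  rcases count with _ | ⟨z, count⟩; · simp at hlen
  rcases count with _ | ⟨w', count⟩; swap; · simp at hlen
  have hx : 1 ≤ x ∧ ∀ c : Int, 1 ≤ c → c < x → 6 * c ∈ used := hC 0 (by omega)
  have hy : 1 ≤ y ∧ ∀ c : Int, 1 ≤ c → c < y → 10 * c ∈ used := hC 1 (by omega)
  have hz : 1 ≤ z ∧ ∀ c : Int, 1 ≤ c → c < z → 15 * c ∈ used := hC 2 (by omega)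
  have h0 := pvAdvance_spec (used.length+1) 6 x used (pvAdvance_exists 6 x (by omega) used)
  have h1 := pvAdvance_spec (used.length+1) 10 y used (pvAdvance_exists 10 y (by omega) used)
  have h2 := pvAdvance_spec (used.length+1) 15 z used (pvAdvance_exists 15 z (by omega) used)
  set a0 := pvAdvance (used.length+1) 6 x used with ha0
  set a1 := pvAdvance (used.length+1) 10 y used with ha1
  set a2 := pvAdvance (used.length+1) 15 z used with ha2
  -- minimality from 1
  have min0 : ∀ c : Int, 1 ≤ c → c < a0 → 6 * c ∈ used := by
    intro c hc1 hc2
    by_cases hcx : c < x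
    · exact hx.2 c hc1 hcx
    · exact h0.2.2 c (by omega) hc2
  have min1 : ∀ c : Int, 1 ≤ c → c < a1 → 10 * c ∈ used := by
    intro c hc1 hc2
    by_cases hcx : c < y
    · exact hy.2 c hc1 hcx
    · exact h1.2.2 c (by omega) hc2
  have min2 : ∀ c : Int, 1 ≤ c → c < a2 → 15 * c ∈ used := by
    intro c hc1 hc2
    by_cases hcx : c < z
    · exact hz.2 c hc1 hcx
    · exact h2.2.2 c (by omega) hc2
  have ha0x : 1 ≤ a0 := le_trans hx.1 h0.2.1
  have ha1x : 1 ≤ a1 := le_trans hy.1 h1.2.1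
  have ha2x : 1 ≤ a2 := le_trans hz.1 h2.2.1
  obtain ⟨wgood, wmin⟩ := pvNext_spec k hk
  have wgt : k < pvNext 12 k := pvNext_gt 12 k
  set W := pvNext 12 k with hW
  have hWused : W ∉ used := by
    intro hmem
    have := (hU W).1 hmem
    have hW' := (pvGood_iff W).1 wgood
    rcases this with h' | h' | h' | h' <;> first
      | (exact hW'.2.1 h') | (exact hW'.2.2.1 h') | (exact hW'.2.2.2 h') | omega
  -- the not-in-used multiples are good and above k
  have claimA : ∀ v : Int, v ∉ used → (6 ∣ v ∨ 10 ∣ v ∨ 15 ∣ v) → 6 ≤ v →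
      pvGood v = true ∧ k < v := by
    intro v hv hdvd h6
    have hv6 : v ≠ 6 := by rintro rfl; exact hv ((hU 6).2 (by omega))
    have hv10 : v ≠ 10 := by rintro rfl; exact hv ((hU 10).2 (by omega))
    have hv15 : v ≠ 15 := by rintro rfl; exact hv ((hU 15).2 (by omega))
    have hg : pvGood v = true := (pvGood_iff v).2 ⟨hdvd, hv6, hv10, hv15⟩
    refine ⟨hg, ?_⟩
    by_contra hle
    exact hv ((hU v).2 (Or.inr (Or.inr (Or.inr ⟨hg, by omega, by omega⟩))))
  have hm0 : 6 ≤ 6 * a0 := by nlinarith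
  have hm1 : 10 ≤ 10 * a1 := by nlinarith
  have hm2 : 15 ≤ 15 * a2 := by nlinarith
  have hA0 := claimA (6 * a0) h0.1 (Or.inl ⟨a0, rfl⟩) (by omega)
  have hA1 := claimA (10 * a1) h1.1 (Or.inr (Or.inl ⟨a1, rfl⟩)) (by omega)
  have hA2 := claimA (15 * a2) h2.1 (Or.inr (Or.inr ⟨a2, rfl⟩)) (by omega)
  -- some candidate is at most W
  have hWge : 6*a0 ≤ W ∨ 10*a1 ≤ W ∨ 15*a2 ≤ W := by
    rcases (pvGood_iff W).1 wgood with ⟨hdvd, -, -, -⟩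
    rcases hdvd with ⟨aw, haw⟩ | ⟨aw, haw⟩ | ⟨aw, haw⟩
    · left
      have haw1 : 1 ≤ aw := by omega
      by_cases hlt : aw < a0
      · exact absurd (min0 aw haw1 hlt) (haw ▸ hWused)
      · omega
    · right; left
      have haw1 : 1 ≤ aw := by omega
      by_cases hlt : aw < a1
      · exact absurd (min1 aw haw1 hlt) (haw ▸ hWused)
      · omega
    · right; right
      have haw1 : 1 ≤ aw := by omega
      by_cases hlt : aw < a2
      · exact absurd (min2 aw haw1 hlt) (haw ▸ hWused)
      · omega
  -- the invariant for the new state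
  have mkInv : ∀ (c0 c1 c2 : Int),
      1 ≤ c0 → 1 ≤ c1 → 1 ≤ c2 →
      (∀ c : Int, 1 ≤ c → c < c0 → 6*c ∈ PySem.Set.add used W) →
      (∀ c : Int, 1 ≤ c → c < c1 → 10*c ∈ PySem.Set.add used W) →
      (∀ c : Int, 1 ≤ c → c < c2 → 15*c ∈ PySem.Set.add used W) →
      StInv (nums ++ [W], PySem.Set.add used W, [c0, c1, c2]) W := by
    intro c0 c1 c2 hc0 hc1 hc2 hm0' hm1' hm2'
    refine ⟨?_, PySem.Set.nodup_add used W hnd, rfl, ?_, by omega⟩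
    · intro m
      rw [PySem.Set.mem_add]
      constructor
      · rintro (hm | rfl)
        · rcases (hU m).1 hm with h' | h' | h' | h' <;> [omega; omega; omega; skip]
          exact Or.inr (Or.inr (Or.inr ⟨h'.1, h'.2.1, by omega⟩))
        · exact Or.inr (Or.inr (Or.inr ⟨wgood, by omega, le_refl _⟩))
      · rintro (rfl | rfl | rfl | ⟨hg, hm1, hm2⟩)
        · exact Or.inl ((hU 6).2 (by omega))
        · exact Or.inl ((hU 10).2 (by omega))
        · exact Or.inl ((hU 15).2 (by omega))
        · by_cases hmk : m ≤ k
          · exact Or.inl ((hU m).2 (Or.inr (Or.inr (Or.inr ⟨hg, hm1, hmk⟩))))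
          · rcases lt_or_eq_of_le hm2 with hlt | rfl
            · exact absurd (wmin m (by omega) hlt) (by simp [hg])
            · exact Or.inr rfl
    · intro i hi
      rcases hi with rfl | rfl | rfl
      · exact ⟨hc0, hm0'⟩
      · exact ⟨hc1, hm1'⟩
      · exact ⟨hc2, hm2'⟩
  have memW : W ∈ PySem.Set.add used W := (PySem.Set.mem_add _ _ _).2 (Or.inr rfl)
  have subW : ∀ m : Int, m ∈ used → m ∈ PySem.Set.add used W :=
    fun m hm => (PySem.Set.mem_add _ _ _).2 (Or.inl hm)
  -- evaluate the step and case on the head of the sorted candidates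
  rw [pvStep_eval]
  simp only []
  obtain ⟨tl, htl⟩ := sorted3_head (6*a0) (10*a1) (15*a2)
  rw [htl]
  split_ifs with hb1 hb2 hb3
  · -- head = (15*a2, 2)
    have hvW : 15*a2 = W := by
      have hle : W ≤ 15*a2 := by
        by_contra hlt
        exact absurd (wmin _ hA2.2 (by omega)) (by simp [hA2.1])
      rcases hWge with h | h | h <;> omega
    constructor
    · show nums ++ [15*a2] = nums ++ [W]
      rw [hvW]
    · show StInv (nums ++ [15*a2], PySem.Set.add used (15*a2), [a0, a1, a2 + 1]) W
      rw [hvW]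
      refine mkInv a0 a1 (a2+1) ha0x ha1x (by omega)
        (fun c hc1 hc2 => subW _ (min0 c hc1 hc2))
        (fun c hc1 hc2 => subW _ (min1 c hc1 hc2))
        (fun c hc1 hc2 => ?_)
      rcases lt_or_eq_of_le (by omega : c ≤ a2) with hlt | rfl
      · exact subW _ (min2 c hc1 hlt)
      · rw [hvW]; exact memW
  · -- head = (10*a1, 1)
    have hvW : 10*a1 = W := by
      have hle : W ≤ 10*a1 := by
        by_contra hlt
        exact absurd (wmin _ hA1.2 (by omega)) (by simp [hA1.1])
      rcases hWge with h | h | h <;> omega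
    constructor
    · show nums ++ [10*a1] = nums ++ [W]
      rw [hvW]
    · show StInv (nums ++ [10*a1], PySem.Set.add used (10*a1), [a0, a1 + 1, a2]) W
      rw [hvW]
      refine mkInv a0 (a1+1) a2 ha0x (by omega) ha2x
        (fun c hc1 hc2 => subW _ (min0 c hc1 hc2))
        (fun c hc1 hc2 => ?_)
        (fun c hc1 hc2 => subW _ (min2 c hc1 hc2))
      rcases lt_or_eq_of_le (by omega : c ≤ a1) with hlt | rfl
      · exact subW _ (min1 c hc1 hlt)
      · rw [hvW]; exact memW
  · -- head = (15*a2, 2)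
    have hvW : 15*a2 = W := by
      have hle : W ≤ 15*a2 := by
        by_contra hlt
        exact absurd (wmin _ hA2.2 (by omega)) (by simp [hA2.1])
      rcases hWge with h | h | h <;> omega
    constructor
    · show nums ++ [15*a2] = nums ++ [W]
      rw [hvW]
    · show StInv (nums ++ [15*a2], PySem.Set.add used (15*a2), [a0, a1, a2 + 1]) W
      rw [hvW]
      refine mkInv a0 a1 (a2+1) ha0x ha1x (by omega)
        (fun c hc1 hc2 => subW _ (min0 c hc1 hc2))
        (fun c hc1 hc2 => subW _ (min1 c hc1 hc2))
        (fun c hc1 hc2 => ?_)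
      rcases lt_or_eq_of_le (by omega : c ≤ a2) with hlt | rfl
      · exact subW _ (min2 c hc1 hlt)
      · rw [hvW]; exact memW
  · -- head = (6*a0, 0)
    have hvW : 6*a0 = W := by
      have hle : W ≤ 6*a0 := by
        by_contra hlt
        exact absurd (wmin _ hA0.2 (by omega)) (by simp [hA0.1])
      rcases hWge with h | h | h <;> omega
    constructor
    · show nums ++ [6*a0] = nums ++ [W]
      rw [hvW]
    · show StInv (nums ++ [6*a0], PySem.Set.add used (6*a0), [a0 + 1, a1, a2]) W
      rw [hvW]
      refine mkInv (a0+1) a1 a2 (by omega) ha1x ha2x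
        (fun c hc1 hc2 => ?_)
        (fun c hc1 hc2 => subW _ (min1 c hc1 hc2))
        (fun c hc1 hc2 => subW _ (min2 c hc1 hc2))
      rcases lt_or_eq_of_le (by omega : c ≤ a0) with hlt | rfl
      · exact subW _ (min0 c hc1 hlt)
      · rw [hvW]; exact memW

lemma init_inv : StInv ([6, 10, 15], PySem.Set.ofList [6, 10, 15], [1, 1, 1]) 1 := by
  refine ⟨?_, PySem.Set.nodup_ofList _, rfl, ?_, le_refl 1⟩
  · intro m
    rw [PySem.Set.mem_ofList]
    constructor
    · rintro h
      fin_cases h <;> tauto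
    · rintro (rfl | rfl | rfl | ⟨-, h1, h2⟩)
      · simp
      · simp
      · simp
      · omega
  · intro i hi
    rcases hi with rfl | rfl | rfl <;>
      exact ⟨le_refl 1, fun c h1 h2 =>
        absurd (lt_of_le_of_lt h1 h2) (by decide : ¬((1:Int) < 1))⟩

lemma a_unroll (t : Nat) :
    ((List.range t).foldl (fun st _ => pvStep st)
        ([6, 10, 15], PySem.Set.ofList [6, 10, 15], [1, 1, 1])).1
      = [6, 10, 15] ++ (List.range t).map (fun j => pvG (j + 1)) ∧
    StInv ((List.range t).foldl (fun st _ => pvStep st)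
        ([6, 10, 15], PySem.Set.ofList [6, 10, 15], [1, 1, 1])) (pvG t) := by
  induction t with
  | zero => exact ⟨by simp, init_inv⟩
  | succ t ih =>
    rw [List.range_succ, List.foldl_append, List.foldl_cons, List.foldl_nil,
        List.map_append]
    obtain ⟨hnums, hinv⟩ := ih
    obtain ⟨hstep, hinv'⟩ := step_main _ (pvG t) hinv
    constructor
    · rw [hstep, hnums]
      simp [pvG]
    · exact hinv'

-- ===== VERDICT (by name: the statement is the Claim_ definition above) =====
theorem solve_spec : Claim_equal_solve := by
  intro n _
  unfold Spec_solve solve solve_alt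
  rw [b_unroll]
  exact (a_unroll (n - 3).toNat).1
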